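-- pv_equiv track=rewrite | github.com/scrubele/algorithms | lab5/main.py | find
-- ===== SOURCE A (Python) =====
-- NO_OF_CHARS = 256
--
-- def bad_char_heuristic(string, size):
--     bad_char = [-1] * NO_OF_CHARS
--     for i in range(size):
--         bad_char[ord(string[i])] = i;
--
--     return bad_char
--
-- def search( txt, pat):
--     m = len(pat)
--     n = len(txt)
--     bad_char = bad_char_heuristic(pat, m)
--     s = 0
--     while s <= n - m:
--         j = m - 1
--         while j >= 0 and pat[j] == txt[s + j]:
--             j -= 1
--         if j < 0:
--             return s
--             s += (m - bad_char[ord(txt[s + m])] if s + m < n else 1)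
--         else:
--             s += max(1, j - bad_char[ord(txt[s + j])])
--
-- def find(str, list_binary):
--     cstr= str
--     list =list_binary
--     count =0
--     for i in list:
--         while (search(str, i ) is not None):
--             count+=str.count(i)
--             str = str.replace(i, "")
--             #print (i, count, str)
--
--     return count
-- ===== SOURCE B (Python) =====
-- def find(str, list_binary):
--     total = 0
--     for pat in list_binary:
--         m = len(pat)
--         if m == 0:
--             continue  # deleting the empty string removes nothing
--         while True:
--             before = len(str)
--             str = _delete_all(str, pat)
--             removed = before - len(str)
--             if removed == 0:
--                 break
--             total += removed // m
--     return total
--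
-- def _delete_all(s, p):
--     out = []
--     i = 0
--     n, m = len(s), len(p)
--     while i < n:
--         if s[i:i + m] == p:
--             i += m
--         else:
--             out.append(s[i])
--             i += 1
--     return "".join(out)
-- ===== Notes on version B (the rewrite author's own statement) =====
-- stated objective: simpler
-- what changed: Each round's Boyer-Moore presence search plus the separate str.count and str.replace scans are replaced by one greedy left-to-right deletion pass, with the occurrence count recovered arithmetically as (length_before - length_after) // len(pattern); empty patterns (on which A loops forever) are skipped and excluded by Pre_.
-- outside the precondition, e.g. on find('ab', ['']): A does not finish within the time limit, B returns 0
import Mathlib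
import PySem

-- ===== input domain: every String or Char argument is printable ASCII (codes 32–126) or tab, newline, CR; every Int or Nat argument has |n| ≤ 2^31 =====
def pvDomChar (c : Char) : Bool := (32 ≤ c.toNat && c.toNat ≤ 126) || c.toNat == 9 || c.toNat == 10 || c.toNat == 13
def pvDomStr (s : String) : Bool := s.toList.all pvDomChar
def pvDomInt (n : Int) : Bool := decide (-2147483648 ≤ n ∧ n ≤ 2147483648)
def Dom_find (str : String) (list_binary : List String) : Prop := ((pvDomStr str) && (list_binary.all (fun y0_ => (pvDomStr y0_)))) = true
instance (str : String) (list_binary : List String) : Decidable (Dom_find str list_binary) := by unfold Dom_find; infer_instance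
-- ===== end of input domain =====

-- B replaces each round's Boyer-Moore search + count + replace by one greedy deletion pass per
-- round (count recovered from the length difference); objective: simpler. Equal on Pre_ (no empty pattern).

-- ===== PORT A =====
def bad_char_heuristic (string : List Char) (size : Nat) : List Int :=
  (List.range size).foldl
    (fun bad_char i => bad_char.set (string.getD i ' ').toNat (i : Int))
    (List.replicate 256 (-1))

-- inner 'while j >= 0 and pat[j] == txt[s + j]: j -= 1' (fuel m + 1 suffices: j starts at m - 1)
def searchInner (pat txt : List Char) (s : Int) : Nat → Int → Int
  | 0, j => j
  | fuel + 1, j =>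
    if 0 ≤ j ∧ PySem.List.pyGet? pat j = PySem.List.pyGet? txt (s + j)
    then searchInner pat txt s fuel (j - 1) else j

-- outer 'while s <= n - m' loop (fuel n + 1 suffices: s grows by at least 1 each pass)
def searchLoop (pat txt : List Char) (bad_char : List Int) (m n : Int) : Nat → Int → Option Int
  | 0, _ => none
  | fuel + 1, s =>
    if s ≤ n - m then
      let j := searchInner pat txt s (m.toNat + 1) (m - 1)
      if j < 0 then some s
      else searchLoop pat txt bad_char m n fuel
        (s + max 1 (j - bad_char.getD ((PySem.List.pyGet? txt (s + j)).getD ' ').toNat (-1)))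
    else none

def search (txt pat : List Char) : Option Int :=
  let m : Int := pat.length
  let n : Int := txt.length
  let bad_char := bad_char_heuristic pat pat.length
  searchLoop pat txt bad_char m n (txt.length + 1) 0

-- 'while search(str, i) is not None: count += str.count(i); str = str.replace(i, "")'
-- (fuel len(str) + 1 suffices: the string strictly shrinks each pass when the pattern is nonempty)
def findLoop (pat : List Char) : Nat → List Char → Int → List Char × Int
  | 0, st, count => (st, count)
  | fuel + 1, st, count =>
    if (search st pat).isSome then
      findLoop pat fuel (PySem.Chars.replace st pat []) (count + (PySem.Chars.count st pat : Int))
    else (st, count)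

def find (str : String) (list_binary : List String) : Int :=
  (list_binary.foldl
    (fun acc i => findLoop i.toList (acc.1.length + 1) acc.1 acc.2)
    (str.toList, (0 : Int))).2

-- ===== PORT B =====
-- one greedy left-to-right deletion pass ('_delete_all' of Source B; out is the accumulator list)
def deleteAllGo (p : List Char) : Nat → List Char → List Char → List Char
  | 0, s, out => out.reverse ++ s
  | _ + 1, [], out => out.reverse
  | fuel + 1, c :: t, out =>
    if p.isPrefixOf (c :: t) then deleteAllGo p fuel ((c :: t).drop p.length) out
    else deleteAllGo p fuel t (c :: out)

def deleteAll (s p : List Char) : List Char := deleteAllGo p s.length s []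

-- 'while True: before = len(str); str = _delete_all(str, pat); removed = ...' (same fuel bound as A's loop)
def fixLoop (pat : List Char) : Nat → List Char → Int → List Char × Int
  | 0, st, total => (st, total)
  | fuel + 1, st, total =>
    let before : Int := st.length
    let st' := deleteAll st pat
    let removed : Int := before - st'.length
    if removed = 0 then (st', total)
    else fixLoop pat fuel st' (total + PySem.Int.floordiv removed (pat.length : Int))

def find_alt (str : String) (list_binary : List String) : Int :=
  (list_binary.foldl
    (fun acc pat =>
      if pat.toList.isEmpty then acc
      else fixLoop pat.toList (acc.1.length + 1) acc.1 acc.2)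
    (str.toList, (0 : Int))).2

-- ===== PRECONDITION & SPEC =====
-- Pre_ excludes lists containing the empty pattern: there A never returns (search("", ...) always
-- succeeds while replace removes nothing, an infinite loop).
def Pre_find (str : String) (list_binary : List String) : Prop :=
  ∀ p ∈ list_binary, p ≠ ""
instance (str : String) (list_binary : List String) : Decidable (Pre_find str list_binary) := by
  unfold Pre_find; infer_instance

def pvWitness_find : String × List String := ("abcabcbc", ["bc", "a"])

def Spec_find (str : String) (list_binary : List String) (out : Int) : Prop := out = find_alt str list_binary
instance (str : String) (list_binary : List String) (out : Int) : Decidable (Spec_find str list_binary out) := by unfold Spec_find; infer_instance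

-- ===== CLAIM (what is proved, stated in full; the proofs are below) =====
def Claim_equal_find : Prop := ∀ (str : String) (list_binary : List String), Dom_find str list_binary → Pre_find str list_binary → Spec_find str list_binary (find str list_binary)

-- ===== LEMMAS AND PROOFS =====

-- proof-side occurrence counter mirroring PySem.Chars.count.go without the accumulator
def cntP (p : List Char) : Nat → List Char → Nat
  | 0, _ => 0
  | _ + 1, [] => 0
  | fuel + 1, c :: t =>
    if p.isPrefixOf (c :: t) then cntP p fuel ((c :: t).drop p.length) + 1 else cntP p fuel t

theorem countGo_eq (p : List Char) :
    ∀ (f : Nat) (s : List Char) (acc : Nat), PySem.Chars.count.go p f s acc = acc + cntP p f s := by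
  intro f
  induction f with
  | zero => intro s acc; simp [PySem.Chars.count.go, cntP]
  | succ f ih =>
    intro s acc
    cases s with
    | nil => simp [PySem.Chars.count.go, cntP]
    | cons c t =>
      rw [PySem.Chars.count.go, cntP]
      by_cases h : p.isPrefixOf (c :: t) <;> simp [h, ih] <;> omega

theorem deleteAllGo_eq_replaceGo (p : List Char) :
    ∀ (f : Nat) (s out : List Char), deleteAllGo p f s out = PySem.Chars.replace.go p [] f s out := by
  intro f
  induction f with
  | zero => intro s out; rfl
  | succ f ih =>
    intro s out
    cases s with
    | nil => rfl
    | cons c t =>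
      rw [deleteAllGo, PySem.Chars.replace.go]
      by_cases h : p.isPrefixOf (c :: t) <;> simp [h, ih]

theorem replaceGo_len (p : List Char) (hp : p ≠ []) :
    ∀ (f : Nat) (s acc : List Char), s.length ≤ f →
      (PySem.Chars.replace.go p [] f s acc).length + p.length * cntP p f s
        = acc.length + s.length := by
  intro f
  induction f with
  | zero =>
    intro s acc hs
    have : s = [] := List.length_eq_zero_iff.mp (Nat.le_zero.mp hs)
    subst this; simp [PySem.Chars.replace.go, cntP]
  | succ f ih =>
    intro s acc hs
    cases s with
    | nil => simp [PySem.Chars.replace.go, cntP]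
    | cons c t =>
      rw [PySem.Chars.replace.go, cntP]
      have hp1 : 1 ≤ p.length := List.length_pos_iff.mpr hp
      by_cases h : p.isPrefixOf (c :: t)
      · have hpre : p <+: (c :: t) := List.isPrefixOf_iff_prefix.mp h
        have hle : p.length ≤ (c :: t).length := hpre.length_le
        have hgo := ih ((c :: t).drop p.length) acc
          (by simp only [List.length_drop, List.length_cons] at hs ⊢; omega)
        have hd : ((c :: t).drop p.length).length = (c :: t).length - p.length :=
          List.length_drop
        simp only [h, if_true, List.reverse_nil, List.nil_append]
        rw [Nat.mul_add, Nat.mul_one]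
        omega
      · have hgo := ih t (c :: acc) (by simp at hs ⊢; omega)
        simp only [h, if_false, Bool.false_eq_true]
        rw [hgo]
        simp
        omega

theorem cntP_zero_iff (p : List Char) (hp : p ≠ []) :
    ∀ (f : Nat) (s : List Char), s.length ≤ f → (cntP p f s = 0 ↔ ¬ p <:+: s) := by
  intro f
  induction f with
  | zero =>
    intro s hs
    have : s = [] := List.length_eq_zero_iff.mp (Nat.le_zero.mp hs)
    subst this
    simp [cntP, List.infix_nil, hp]
  | succ f ih =>
    intro s hs
    cases s with
    | nil => simp [cntP, List.infix_nil, hp]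
    | cons c t =>
      rw [cntP]
      by_cases h : p.isPrefixOf (c :: t)
      · have hpre : p <+: (c :: t) := List.isPrefixOf_iff_prefix.mp h
        simp [h, List.infix_cons_iff]
        tauto
      · have hnpre : ¬ p <+: (c :: t) := fun hc => h (List.isPrefixOf_iff_prefix.mpr hc)
        have := ih t (by simp at hs; omega)
        simp [h, List.infix_cons_iff, hnpre, this]

theorem replaceGo_of_no_occur (p : List Char) (hp : p ≠ []) :
    ∀ (f : Nat) (s acc : List Char), s.length ≤ f → ¬ p <:+: s →
      PySem.Chars.replace.go p [] f s acc = acc.reverse ++ s := by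
  intro f
  induction f with
  | zero => intro s acc _ _; rfl
  | succ f ih =>
    intro s acc hs hno
    cases s with
    | nil => simp [PySem.Chars.replace.go]
    | cons c t =>
      rw [PySem.Chars.replace.go]
      have hnpre : ¬ p <+: (c :: t) := fun hc => hno (hc.isInfix)
      have h : p.isPrefixOf (c :: t) = false := by
        by_contra hb
        exact hnpre (List.isPrefixOf_iff_prefix.mp (by simpa using hb))
      rw [if_neg (by simp [h])]
      rw [ih t (c :: acc) (by simp at hs ⊢; omega)
        (fun hc => hno (List.infix_cons_iff.mpr (Or.inr hc)))]
      simp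

theorem mem_replaceGo (p : List Char) :
    ∀ (f : Nat) (s acc : List Char) (c : Char),
      c ∈ PySem.Chars.replace.go p [] f s acc → c ∈ acc ∨ c ∈ s := by
  intro f
  induction f with
  | zero => intro s acc c hc; rw [PySem.Chars.replace.go] at hc; simp at hc; tauto
  | succ f ih =>
    intro s acc c hc
    cases s with
    | nil =>
      have he : PySem.Chars.replace.go p [] (f + 1) [] acc = acc.reverse := rfl
      rw [he] at hc; simp at hc; tauto
    | cons d t =>
      rw [PySem.Chars.replace.go] at hc
      by_cases h : p.isPrefixOf (d :: t)
      · rw [if_pos (by simp [h])] at hc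
        simp only [List.reverse_nil, List.nil_append] at hc
        rcases ih _ _ _ hc with h1 | h1
        · exact Or.inl h1
        · exact Or.inr (List.mem_of_mem_drop h1)
      · rw [if_neg (by simp [h])] at hc
        rcases ih _ _ _ hc with h1 | h1
        · simp at h1; rcases h1 with h1 | h1
          · exact Or.inr (by simp [h1])
          · exact Or.inl h1
        · exact Or.inr (by simp [h1])

theorem foldl_set_length (p : List Char) :
    ∀ (l : List Nat) (init : List Int),
      (l.foldl (fun bc i => bc.set (p.getD i ' ').toNat (i : Int)) init).length
        = init.length := by
  intro l
  induction l with
  | nil => intro init; rfl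
  | cons x xs ih => intro init; rw [List.foldl_cons, ih]; simp

theorem bc_ub_aux (p : List Char) :
    ∀ (sz : Nat) (c : Char), c.toNat < 256 → ∀ i : Nat, i < sz → p.getD i ' ' = c →
      (i : Int) ≤ ((List.range sz).foldl
          (fun bc i => bc.set (p.getD i ' ').toNat (i : Int))
          (List.replicate 256 (-1))).getD c.toNat (-1) := by
  intro sz
  induction sz with
  | zero => intro c _ i hi; omega
  | succ sz ih =>
    intro c hc i hi hpc
    rw [List.range_succ, List.foldl_append, List.foldl_cons, List.foldl_nil]
    have hlen : ((List.range sz).foldl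
        (fun bc i => bc.set (p.getD i ' ').toNat (i : Int))
        (List.replicate 256 (-1))).length = 256 := by
      rw [foldl_set_length, List.length_replicate]
    by_cases hj : (p.getD sz ' ').toNat = c.toNat
    · rw [hj]
      rw [show ∀ (l : List Int) (a : Int), l.length = 256 → (l.set c.toNat a).getD c.toNat (-1) = a from
        fun l a hl => by
          have h : c.toNat < l.length := by omega
          simp [List.getD_eq_getElem?_getD, h]]
      · omega
      · exact hlen
    · rw [show ∀ (l : List Int) (j : Nat) (a : Int), j ≠ c.toNat →
          (l.set j a).getD c.toNat (-1) = l.getD c.toNat (-1) from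
        fun l j a hne => by simp [List.getD_eq_getElem?_getD, List.getElem?_set_ne hne]]
      · rcases Nat.lt_or_ge i sz with h | h
        · exact ih c hc i h hpc
        · have : i = sz := by omega
          subst this
          rw [hpc] at hj
          exact absurd rfl hj
      · exact hj

theorem bc_ub (p : List Char) (c : Char) (hc : c.toNat < 256) :
    ∀ i : Nat, i < p.length → p.getD i ' ' = c →
      (i : Int) ≤ (bad_char_heuristic p p.length).getD c.toNat (-1) := by
  intro i hi hpc
  exact bc_ub_aux p p.length c hc i hi hpc

theorem prefix_drop_iff (pat txt : List Char) (t : Nat) :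
    pat <+: txt.drop t ↔ ∀ k : Nat, k < pat.length → pat[k]? = txt[t + k]? := by
  rw [List.prefix_iff_eq_take]
  constructor
  · intro he k hk
    conv_lhs => rw [he]
    rw [List.getElem?_take, if_pos hk, List.getElem?_drop]
  · intro hall
    apply List.ext_getElem?
    intro i
    by_cases hi : i < pat.length
    · rw [List.getElem?_take, if_pos hi, List.getElem?_drop, hall i hi]
    · rw [List.getElem?_take, if_neg hi, List.getElem?_eq_none (by omega)]

theorem infix_iff_exists_drop (pat txt : List Char) :
    pat <:+: txt ↔ ∃ j : Nat, pat <+: txt.drop j := by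
  rw [← PySem.Chars.isIn_iff_infix, ← PySem.Chars.exists_prefix_drop_iff_isIn]

theorem searchInner_spec (pat txt : List Char) (s : Int) :
    ∀ (f : Nat) (j : Int), -1 ≤ j → j < (f : Int) →
      -1 ≤ searchInner pat txt s f j ∧ searchInner pat txt s f j ≤ j ∧
      (∀ k : Int, searchInner pat txt s f j < k → k ≤ j →
        PySem.List.pyGet? pat k = PySem.List.pyGet? txt (s + k)) ∧
      (0 ≤ searchInner pat txt s f j →
        PySem.List.pyGet? pat (searchInner pat txt s f j)
          ≠ PySem.List.pyGet? txt (s + searchInner pat txt s f j)) := by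
  intro f
  induction f with
  | zero =>
    intro j h1 h2
    have hj : j = -1 := by omega
    subst hj
    refine ⟨by simp [searchInner], by simp [searchInner], ?_, ?_⟩
    · intro k hk1 hk2
      simp only [searchInner] at hk1
      omega
    · intro h0
      simp only [searchInner] at h0
      omega
  | succ f ih =>
    intro j h1 h2
    rw [searchInner]
    by_cases hg : 0 ≤ j ∧ PySem.List.pyGet? pat j = PySem.List.pyGet? txt (s + j)
    · rw [if_pos hg]
      obtain ⟨r1, r2, r3, r4⟩ := ih (j - 1) (by omega) (by omega)
      refine ⟨r1, by omega, ?_, r4⟩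
      intro k hk1 hk2
      rcases eq_or_lt_of_le hk2 with he | hlt
      · subst he; exact hg.2
      · exact r3 k hk1 (by omega)
    · rw [if_neg hg]
      refine ⟨h1, le_refl _, ?_, ?_⟩
      · intro k hk1 hk2; omega
      · intro h0 heq
        exact hg ⟨h0, heq⟩

theorem inner_neg_iff (pat txt : List Char) (hp : pat ≠ []) (sn : Nat) :
    (searchInner pat txt (sn : Int) (pat.length + 1) ((pat.length : Int) - 1) < 0
      ↔ pat <+: txt.drop sn) := by
  have hm1 : 1 ≤ pat.length := List.length_pos_iff.mpr hp
  obtain ⟨r1, r2, r3, r4⟩ := searchInner_spec pat txt (sn : Int) (pat.length + 1)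
    ((pat.length : Int) - 1) (by push_cast; omega) (by push_cast; omega)
  rw [prefix_drop_iff]
  constructor
  · intro hr k hk
    have hkk := r3 (k : Int) (by omega) (by push_cast; omega)
    rw [PySem.List.pyGet?_natCast] at hkk
    rw [show (sn : Int) + (k : Int) = ((sn + k : Nat) : Int) by push_cast; ring,
      PySem.List.pyGet?_natCast] at hkk
    exact hkk
  · intro hall
    by_contra hr
    push_neg at hr
    have hmis := r4 hr
    set r := searchInner pat txt (sn : Int) (pat.length + 1) ((pat.length : Int) - 1) with hrdef
    have hrn : r.toNat < pat.length := by omega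
    have heq := hall r.toNat hrn
    apply hmis
    rw [show r = ((r.toNat : Nat) : Int) from (Int.toNat_of_nonneg hr).symm,
      PySem.List.pyGet?_natCast,
      show (sn : Int) + ((r.toNat : Nat) : Int) = ((sn + r.toNat : Nat) : Int) by push_cast; ring,
      PySem.List.pyGet?_natCast]
    exact heq

theorem bc_entries (p : List Char) :
    ∀ (l : List Nat) (init : List Int), (∀ x ∈ init, -1 ≤ x) →
      ∀ x ∈ l.foldl (fun bc i => bc.set (p.getD i ' ').toNat (i : Int)) init, -1 ≤ x := by
  intro l
  induction l with
  | nil => intro init h x hx; exact h x hx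
  | cons a as ih =>
    intro init h x hx
    refine ih _ ?_ x hx
    intro y hy
    rcases List.mem_or_eq_of_mem_set hy with h1 | h1
    · exact h y h1
    · subst h1; omega

theorem bc_lb (p : List Char) (idx : Nat) :
    -1 ≤ (bad_char_heuristic p p.length).getD idx (-1) := by
  unfold bad_char_heuristic
  rcases h : ((List.range p.length).foldl
      (fun bc i => bc.set (p.getD i ' ').toNat (i : Int)) (List.replicate 256 (-1)))[idx]? with _ | v
  · rw [List.getD_eq_getElem?_getD, h]
    exact le_rfl
  · have hv := List.mem_of_getElem? h
    have := bc_entries p (List.range p.length) (List.replicate 256 (-1))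
      (by intro x hx; have := List.eq_of_mem_replicate hx; omega) v hv
    rw [List.getD_eq_getElem?_getD, h]
    exact this

theorem no_occ_of_inv (pat txt : List Char) (hm1 : 1 ≤ pat.length) (s : Int)
    (hbig : (txt.length : Int) - pat.length < s)
    (hinv : ∀ t : Nat, (t : Int) < s → ¬ pat <+: txt.drop t) : ¬ pat <:+: txt := by
  intro hin
  obtain ⟨j, hj⟩ := (infix_iff_exists_drop pat txt).mp hin
  have hjlen := hj.length_le
  rw [List.length_drop] at hjlen
  exact hinv j (by omega) hj

theorem searchLoop_spec (pat txt : List Char) (hp : pat ≠ [])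
    (h256 : ∀ c ∈ txt, c.toNat < 256) :
    ∀ (f : Nat) (s : Int), 0 ≤ s →
      (txt.length : Int) - pat.length - s < (f : Int) →
      (∀ t : Nat, (t : Int) < s → ¬ pat <+: txt.drop t) →
      ((searchLoop pat txt (bad_char_heuristic pat pat.length)
          (pat.length : Int) (txt.length : Int) f s).isSome = true
        ↔ pat <:+: txt) := by
  have hm1 : 1 ≤ pat.length := List.length_pos_iff.mpr hp
  intro f
  induction f with
  | zero =>
    intro s hs0 hf hinv
    rw [searchLoop]
    simp only [Option.isSome_none, Bool.false_eq_true, false_iff]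
    exact no_occ_of_inv pat txt hm1 s (by push_cast at hf; omega) hinv
  | succ f ih =>
    intro s hs0 hf hinv
    rw [searchLoop]
    by_cases hguard : s ≤ (txt.length : Int) - (pat.length : Int)
    · rw [if_pos hguard]
      have htn : ((pat.length : Int)).toNat = pat.length := Int.toNat_natCast _
      show ((if searchInner pat txt s ((pat.length : Int)).toNat.succ ((pat.length : Int) - 1) < 0
          then some s
          else searchLoop pat txt (bad_char_heuristic pat pat.length) (pat.length : Int)
            (txt.length : Int) f
            (s + max 1 (searchInner pat txt s ((pat.length : Int)).toNat.succ ((pat.length : Int) - 1)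
              - (bad_char_heuristic pat pat.length).getD
                  ((PySem.List.pyGet? txt
                    (s + searchInner pat txt s ((pat.length : Int)).toNat.succ
                      ((pat.length : Int) - 1))).getD ' ').toNat (-1)))).isSome = true)
        ↔ pat <:+: txt
      rw [htn]
      set j := searchInner pat txt s (pat.length.succ) ((pat.length : Int) - 1) with hjdef
      have hsn : s = (s.toNat : Int) := (Int.toNat_of_nonneg hs0).symm
      have hinner : (j < 0 ↔ pat <+: txt.drop s.toNat) := by
        rw [hjdef, hsn]
        exact inner_neg_iff pat txt hp s.toNat
      by_cases hj0 : j < 0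
      · rw [if_pos hj0]
        simp only [Option.isSome_some, true_iff]
        exact (infix_iff_exists_drop pat txt).mpr ⟨s.toNat, hinner.mp hj0⟩
      · rw [if_neg hj0]
        obtain ⟨r1, r2, r3, r4⟩ := searchInner_spec pat txt s (pat.length.succ)
          ((pat.length : Int) - 1) (by omega) (by push_cast; omega)
        rw [← hjdef] at r1 r2 r3 r4
        push_neg at hj0
        set v := (bad_char_heuristic pat pat.length).getD
          ((PySem.List.pyGet? txt (s + j)).getD ' ').toNat (-1) with hvdef
        have hv1 : -1 ≤ v := bc_lb pat _
        apply ih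
        · have := le_max_left 1 (j - v); omega
        · have := le_max_left 1 (j - v); push_cast at hf ⊢; omega
        · intro t ht
          by_cases htold : (t : Int) < s
          · exact hinv t htold
          · push_neg at htold
            by_cases hts : (t : Int) = s
            · intro hpre
              apply hj0.not_gt
              apply hinner.mpr
              have : t = s.toNat := by omega
              rwa [this] at hpre
            · -- s < t < s + max 1 (j - v); show no match at t
              intro hpre
              have hts' : s + 1 ≤ (t : Int) := by omega
              have hd : (t : Int) < s + (j - v) := by
                rcases max_cases 1 (j - v) with ⟨hmx, _⟩ | ⟨hmx, _⟩ <;> omega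
              -- index into pat hit by the bad-character position
              have hsj : 0 ≤ s + j := by omega
              have hsjn : (s + j).toNat < txt.length := by omega
              have hch : txt[(s + j).toNat]? = some (txt[(s + j).toNat]'hsjn) :=
                List.getElem?_eq_some_iff.mpr ⟨hsjn, rfl⟩
              set ch := txt[(s + j).toNat]'hsjn with hchdef
              have hchmem : ch ∈ txt := List.mem_of_getElem? hch
              have hch256 : ch.toNat < 256 := h256 ch hchmem
              -- c in the code equals ch
              have hc_eq : ((PySem.List.pyGet? txt (s + j)).getD ' ') = ch := by
                rw [show s + j = (((s + j).toNat : Nat) : Int) from (Int.toNat_of_nonneg hsj).symm,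
                  PySem.List.pyGet?_natCast, hch]
                rfl
              -- the matched position j - (t - s) in pat
              have hk1 : 1 ≤ (t : Int) - s := by omega
              have hjk0 : 0 ≤ j - ((t : Int) - s) := by omega
              have hjkm : (j - ((t : Int) - s)).toNat < pat.length := by omega
              have hall := (prefix_drop_iff pat txt t).mp hpre (j - ((t : Int) - s)).toNat hjkm
              have hidx : t + (j - ((t : Int) - s)).toNat = (s + j).toNat := by omega
              rw [hidx, hch] at hall
              have hgetD : pat.getD (j - ((t : Int) - s)).toNat ' ' = ch := by
                rw [List.getD_eq_getElem?_getD, hall]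
                rfl
              have hub := bc_ub pat ch (by omega) (j - ((t : Int) - s)).toNat hjkm hgetD
              rw [← hc_eq] at hub
              rw [← hvdef] at hub
              omega
    · rw [if_neg hguard]
      simp only [Option.isSome_none, Bool.false_eq_true, false_iff]
      exact no_occ_of_inv pat txt hm1 s (by omega) hinv

theorem search_isSome_iff (txt pat : List Char) (hp : pat ≠ [])
    (h256 : ∀ c ∈ txt, c.toNat < 256) :
    (search txt pat).isSome = true ↔ pat <:+: txt := by
  have hm1 : 1 ≤ pat.length := List.length_pos_iff.mpr hp
  unfold search
  apply searchLoop_spec pat txt hp h256 (txt.length + 1) 0 le_rfl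
    (by push_cast; omega)
  intro t ht
  omega

theorem findLoop_eq_fixLoop (p : List Char) (hp : p ≠ []) :
    ∀ (f : Nat) (st : List Char) (c : Int), (∀ ch ∈ st, ch.toNat < 256) →
      findLoop p f st c = fixLoop p f st c := by
  have hm1 : 1 ≤ p.length := List.length_pos_iff.mpr hp
  have hpe : p.isEmpty = false := by simp [List.isEmpty_iff, hp]
  intro f
  induction f with
  | zero => intro st c h256; rfl
  | succ f ih =>
    intro st c h256
    have hrepl : deleteAll st p = PySem.Chars.replace st p [] := by
      rw [deleteAll, deleteAllGo_eq_replaceGo, PySem.Chars.replace, hpe]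
      simp
    have hcnt : PySem.Chars.count st p = cntP p st.length st := by
      rw [PySem.Chars.count, hpe]
      simp [countGo_eq]
    have hlen := replaceGo_len p hp st.length st [] le_rfl
    simp only [List.length_nil, Nat.zero_add] at hlen
    have hgo : PySem.Chars.replace st p [] = PySem.Chars.replace.go p [] st.length st [] := by
      rw [PySem.Chars.replace, hpe]
      simp
    show (if (search st p).isSome = true
        then findLoop p f (PySem.Chars.replace st p []) (c + (PySem.Chars.count st p : Int))
        else (st, c))
      = (if ((st.length : Int)) - (((deleteAll st p).length : Int)) = 0
        then (deleteAll st p, c)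
        else fixLoop p f (deleteAll st p)
          (c + PySem.Int.floordiv ((st.length : Int) - ((deleteAll st p).length : Int))
            (p.length : Int)))
    by_cases hocc : p <:+: st
    · have hg : (search st p).isSome = true := (search_isSome_iff st p hp h256).mpr hocc
      have hcpos : cntP p st.length st ≠ 0 :=
        fun h0 => ((cntP_zero_iff p hp st.length st le_rfl).mp h0) hocc
      have hrm : (st.length : Int) - ((deleteAll st p).length : Int)
          = ((p.length * cntP p st.length st : Nat) : Int) := by
        rw [hrepl, hgo]
        push_cast
        omega
      have hne : p.length * cntP p st.length st ≠ 0 := Nat.mul_ne_zero (by omega) hcpos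
      rw [if_pos hg, if_neg (by rw [hrm]; exact_mod_cast hne)]
      rw [hrm, PySem.Int.floordiv_natCast, Nat.mul_div_cancel_left _ (by omega), hrepl, hcnt]
      apply ih
      intro ch hch
      rw [hgo] at hch
      rcases mem_replaceGo p st.length st [] ch hch with h1 | h1
      · exact absurd h1 (List.not_mem_nil)
      · exact h256 ch h1
    · have hg : (search st p).isSome = false := by
        cases hsearch : (search st p).isSome with
        | false => rfl
        | true => exact absurd ((search_isSome_iff st p hp h256).mp hsearch) hocc
      have hst' : deleteAll st p = st := by
        rw [hrepl, hgo]
        exact replaceGo_of_no_occur p hp st.length st [] le_rfl hocc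
      rw [if_neg (by rw [hg]; exact Bool.false_ne_true), if_pos (by rw [hst']; ring)]
      rw [hst']

theorem mem_findLoop_fst (p : List Char) (hp : p ≠ []) :
    ∀ (f : Nat) (st : List Char) (c : Int) (ch : Char),
      ch ∈ (findLoop p f st c).1 → ch ∈ st := by
  have hpe : p.isEmpty = false := by simp [List.isEmpty_iff, hp]
  intro f
  induction f with
  | zero => intro st c ch h; exact h
  | succ f ih =>
    intro st c ch h
    rw [findLoop] at h
    by_cases hg : (search st p).isSome
    · rw [if_pos hg] at h
      have hmem := ih _ _ _ h
      have : PySem.Chars.replace st p [] = PySem.Chars.replace.go p [] st.length st [] := by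
        unfold PySem.Chars.replace
        rw [hpe]
        simp
      rw [this] at hmem
      rcases mem_replaceGo p st.length st [] ch hmem with h1 | h1
      · exact absurd h1 (List.not_mem_nil)
      · exact h1
    · rw [if_neg hg] at h
      exact h

-- ===== VERDICT (by name: the statement is the Claim_ definition above) =====
theorem find_spec : Claim_equal_find := by
  unfold Claim_equal_find
  intro str list_binary hdom hpre
  unfold Spec_find find find_alt
  have hdc : ∀ ch ∈ str.toList, ch.toNat < 256 := by
    intro ch hch
    unfold Dom_find at hdom
    simp only [Bool.and_eq_true] at hdom
    have h1 : pvDomStr str = true := hdom.1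
    unfold pvDomStr at h1
    rw [List.all_eq_true] at h1
    have := h1 ch hch
    unfold pvDomChar at this
    simp only [Bool.or_eq_true, Bool.and_eq_true, decide_eq_true_eq, beq_iff_eq] at this
    omega
  suffices h : ∀ (pats : List String) (st : List Char) (c : Int),
      (∀ ch ∈ st, ch.toNat < 256) → (∀ p ∈ pats, p ≠ "") →
      pats.foldl (fun acc i => findLoop i.toList (acc.1.length + 1) acc.1 acc.2) (st, c)
        = pats.foldl (fun acc pat => if pat.toList.isEmpty then acc
            else fixLoop pat.toList (acc.1.length + 1) acc.1 acc.2) (st, c) by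
    rw [h list_binary str.toList 0 hdc hpre]
  intro pats
  induction pats with
  | nil => intro st c _ _; rfl
  | cons q qs ih =>
    intro st c h256 hne
    have hq : q ≠ "" := hne q List.mem_cons_self
    have hql : q.toList ≠ [] := fun hc => hq (String.toList_eq_nil_iff.mp hc)
    rw [List.foldl_cons, List.foldl_cons,
      if_neg (by simp only [List.isEmpty_iff]; exact hql)]
    rw [← findLoop_eq_fixLoop q.toList hql (st.length + 1) st c h256]
    rcases hfq : findLoop q.toList (st.length + 1) st c with ⟨st', c'⟩
    apply ih
    · intro ch hch
      apply h256
      have : ch ∈ (findLoop q.toList (st.length + 1) st c).1 := by rw [hfq]; exact hch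
      exact mem_findLoop_fst q.toList hql (st.length + 1) st c ch this
    · intro p hp'
      exact hne p (List.mem_cons_of_mem _ hp')
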